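-- pv_equiv track=rewrite | github.com/MatisVivier/automates | longueur.py | parcours_profondeur
-- ===== SOURCE A (Python) =====
-- def parcours_profondeur(Graphe):
--     # Initialisation
--     predecesseurs = {}
--     profondeurs = {}
--
--     # Parcours de tous les sommets dans le graphe
--     for sommet in Graphe:
--         predecesseurs[sommet] = 0
--         profondeurs[sommet] = 0
--
--     # Parcours en profondeur pour chaque sommet non visité
--     for sommet in Graphe:
--         if predecesseurs[sommet] == 0:
--             predecesseurs[sommet] = sommet  # Marquer le sommet comme visité
--             parcours_profondeur_recursive(sommet, Graphe, predecesseurs, profondeurs, 0)  # Appel de la fonction récursive avec une profondeur initiale de 0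
--
--     return predecesseurs, profondeurs
--
-- def parcours_profondeur_recursive(sommet, Graphe, predecesseurs, profondeurs, profondeur_actuelle):
--     # Mise à jour de la profondeur du sommet
--     profondeurs[sommet] = profondeur_actuelle
--
--     # Parcours de tous les voisins du sommet
--     for voisin in Graphe[sommet]:
--         if predecesseurs[voisin] == 0:
--             predecesseurs[voisin] = sommet  # Marquer le voisin comme visité
--             parcours_profondeur_recursive(voisin, Graphe, predecesseurs, profondeurs, profondeur_actuelle + 1)  # Appel récursif pour le voisin avec une profondeur augmentée de 1
-- ===== SOURCE B (Python) =====
-- def parcours_profondeur(Graphe):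
--     predecesseurs = {sommet: 0 for sommet in Graphe}
--     profondeurs = {sommet: 0 for sommet in Graphe}
--
--     for sommet in Graphe:
--         if predecesseurs[sommet] == 0:
--             predecesseurs[sommet] = sommet
--             profondeurs[sommet] = 0
--             # explicit-stack DFS simulating the recursion: each frame holds
--             # (vertex, list of its not-yet-examined neighbours, its depth)
--             stack = [(sommet, list(Graphe[sommet]), 0)]
--             while stack:
--                 v, rest, depth = stack[-1]
--                 if not rest:
--                     stack.pop()
--                     continue
--                 voisin = rest.pop(0)
--                 if predecesseurs[voisin] == 0:
--                     predecesseurs[voisin] = v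
--                     profondeurs[voisin] = depth + 1
--                     stack.append((voisin, list(Graphe[voisin]), depth + 1))
--
--     return predecesseurs, profondeurs
-- ===== Notes on version B (the rewrite author's own statement) =====
-- stated objective: alternative
-- what changed: The recursive DFS helper is replaced by an iterative DFS with an explicit stack of (vertex, remaining-neighbours, depth) frames that examines one neighbour at a time, marking predecessors/depths lazily exactly when the corresponding edge is reached.
import Mathlib
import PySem

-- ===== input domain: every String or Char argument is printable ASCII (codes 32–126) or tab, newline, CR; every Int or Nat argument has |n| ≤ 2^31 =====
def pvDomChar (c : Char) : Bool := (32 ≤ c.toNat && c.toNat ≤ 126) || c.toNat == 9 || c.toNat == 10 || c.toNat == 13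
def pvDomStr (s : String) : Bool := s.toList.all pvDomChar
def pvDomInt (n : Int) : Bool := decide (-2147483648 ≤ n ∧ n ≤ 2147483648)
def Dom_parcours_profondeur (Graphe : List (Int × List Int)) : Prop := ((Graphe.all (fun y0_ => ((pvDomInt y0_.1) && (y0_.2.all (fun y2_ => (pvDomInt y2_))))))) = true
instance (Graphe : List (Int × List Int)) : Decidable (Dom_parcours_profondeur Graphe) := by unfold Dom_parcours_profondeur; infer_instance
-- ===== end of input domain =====

-- B changes the recursive helper into an explicit-stack iterative DFS (return value only; A mutates its dicts in place, which no caller observes through the return).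
-- Both Lean ports carry a fuel counter solely as a totality guard for the (possibly non-terminating outside Pre_) sentinel-based traversal.

-- ===== PORT A =====

-- the recursive helper parcours_profondeur_recursive and its 'for voisin in Graphe[sommet]' loop
mutual
def pvRecA (d : PySem.Dict Int (List Int)) (f : Nat) (sommet : Int) (depth : Int)
    (pred prof : PySem.Dict Int Int) : Option (PySem.Dict Int Int × PySem.Dict Int Int) :=
  match f with
  | 0 => none  -- fuel exhausted (Python: unbounded recursion / RecursionError; unreachable under Pre_)
  | f + 1 => pvGoA d f sommet depth (d.getD sommet []) pred (prof.insert sommet depth)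
termination_by (f, 0, 0)

def pvGoA (d : PySem.Dict Int (List Int)) (f : Nat) (sommet : Int) (depth : Int)
    (ns : List Int) (pred prof : PySem.Dict Int Int) : Option (PySem.Dict Int Int × PySem.Dict Int Int) :=
  match ns with
  | [] => some (pred, prof)
  | voisin :: rest =>
    if pred.getD voisin 0 = 0 then
      match pvRecA d f voisin (depth + 1) (pred.insert voisin sommet) prof with
      | none => none
      | some (p, q) => pvGoA d f sommet depth rest p q
    else pvGoA d f sommet depth rest pred prof
termination_by (f, 1, ns.length)
end

def parcours_profondeur (Graphe : List (Int × List Int)) : (List (Int × Int)) × (List (Int × Int)) :=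
  let d := PySem.Dict.ofList Graphe
  let ks := d.keys
  -- initialisation loop: predecesseurs[sommet] = 0; profondeurs[sommet] = 0
  let init := ks.foldl (fun (pq : PySem.Dict Int Int × PySem.Dict Int Int) s =>
      (pq.1.insert s 0, pq.2.insert s 0)) (PySem.Dict.empty, PySem.Dict.empty)
  -- root loop
  let res := ks.foldl (fun (st : Option (PySem.Dict Int Int × PySem.Dict Int Int)) s =>
      match st with
      | none => none
      | some (pred, prof) =>
        if pred.getD s 0 = 0 then
          pvRecA d (2 * ks.length + 3) s 0 (pred.insert s s) prof
        else some (pred, prof)) (some init)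
  match res with
  | some (pred, prof) => (pred.items, prof.items)
  | none => ([], [])  -- fuel exhausted: Python raises RecursionError here (outside Pre_)

-- ===== PORT B =====

-- the 'while stack:' loop: each frame is (vertex, not-yet-examined neighbours, depth)
def pvLoopB (d : PySem.Dict Int (List Int)) : Nat → List (Int × List Int × Int) →
    PySem.Dict Int Int → PySem.Dict Int Int → Option (PySem.Dict Int Int × PySem.Dict Int Int)
  | _, [], pred, prof => some (pred, prof)
  | 0, _ :: _, _, _ => none  -- fuel exhausted (Python: infinite loop; unreachable under Pre_)
  | f + 1, (v, ns, depth) :: st, pred, prof =>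
    match ns with
    | [] => pvLoopB d f st pred prof
    | voisin :: rest =>
      if pred.getD voisin 0 = 0 then
        pvLoopB d f ((voisin, d.getD voisin [], depth + 1) :: (v, rest, depth) :: st)
          (pred.insert voisin v) (prof.insert voisin (depth + 1))
      else pvLoopB d f ((v, rest, depth) :: st) pred prof

def parcours_profondeur_alt (Graphe : List (Int × List Int)) : (List (Int × Int)) × (List (Int × Int)) :=
  let d := PySem.Dict.ofList Graphe
  let ks := d.keys
  let pred0 := ks.foldl (fun (a : PySem.Dict Int Int) s => a.insert s 0) PySem.Dict.empty
  let prof0 := ks.foldl (fun (a : PySem.Dict Int Int) s => a.insert s 0) PySem.Dict.empty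
  -- fuel: a crude computable bound on the iteration count of each root's loop
  let fuelB :=
    let S := (ks.map (fun k => (d.getD k []).length)).sum
    2 * (S * (S + 2)) + 2 * S + 2 * ks.length + 2
  let res := ks.foldl (fun (st : Option (PySem.Dict Int Int × PySem.Dict Int Int)) s =>
      match st with
      | none => none
      | some (pred, prof) =>
        if pred.getD s 0 = 0 then
          pvLoopB d fuelB [(s, d.getD s [], 0)] (pred.insert s s) (prof.insert s 0)
        else some (pred, prof)) (some (pred0, prof0))
  match res with
  | some (pred, prof) => (pred.items, prof.items)
  | none => ([], [])  -- fuel exhausted: Python loops forever here (outside Pre_)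

-- ===== PRECONDITION & SPEC =====
-- Pre_ excludes (i) graphs in which some neighbour is not itself a vertex (Python raises KeyError there), and
-- (ii) graphs with a self-loop on vertex 0: 0 collides with the literal 'unvisited' sentinel 0, and when the
-- traversal reaches the edge 0->0 both programs recurse/loop forever (RecursionError in A); graphs with
-- an adjacency list of vertex 0 containing 0 itself are excluded as a closed-form over-approximation of that crash region.
def Pre_parcours_profondeur (Graphe : List (Int × List Int)) : Prop :=
  (0 : Int) ∉ (PySem.Dict.ofList Graphe).getD 0 [] ∧
  ∀ k ∈ (PySem.Dict.ofList Graphe).keys,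
    ∀ v ∈ (PySem.Dict.ofList Graphe).getD k [], v ∈ (PySem.Dict.ofList Graphe).keys

instance (Graphe : List (Int × List Int)) : Decidable (Pre_parcours_profondeur Graphe) := by
  unfold Pre_parcours_profondeur; infer_instance

def pvWitness_parcours_profondeur : (List (Int × List Int)) := [(1, [2, 3]), (2, [1]), (3, []), (4, [2])]

def Spec_parcours_profondeur (Graphe : List (Int × List Int)) (out : (List (Int × Int)) × (List (Int × Int))) : Prop := out = parcours_profondeur_alt Graphe
instance (Graphe : List (Int × List Int)) (out : (List (Int × Int)) × (List (Int × Int))) : Decidable (Spec_parcours_profondeur Graphe out) := by unfold Spec_parcours_profondeur; infer_instance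

-- ===== CLAIM (what is proved, stated in full; the proofs are below) =====
def Claim_equal_parcours_profondeur : Prop := ∀ (Graphe : List (Int × List Int)), Dom_parcours_profondeur Graphe → Pre_parcours_profondeur Graphe → Spec_parcours_profondeur Graphe (parcours_profondeur Graphe)

-- ===== LEMMAS AND PROOFS =====


-- number of still-unmarked vertices
def pvU (d : PySem.Dict Int (List Int)) (pred : PySem.Dict Int Int) : Nat :=
  (d.keys.filter (fun k => pred.getD k 0 = 0)).length

-- potential bounding the remaining iteration count of B's loop
def pvPhi (d : PySem.Dict Int (List Int)) (pred : PySem.Dict Int Int) : Nat :=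
  ((d.keys.filter (fun k => pred.getD k 0 = 0)).map (fun k => (d.getD k []).length + 2)).sum

theorem pv_filter_perm_mark {w : Int} (p q : Int → Bool) (l : List Int) (hl : l.Nodup) (hw : w ∈ l)
    (hpw : p w = true) (hqw : q w = false) (hagree : ∀ k, k ≠ w → p k = q k) :
    List.Perm (l.filter p) (w :: l.filter q) := by
  induction l with
  | nil => cases hw
  | cons a t ih =>
    rcases List.mem_cons.1 hw with rfl | hwt
    · have hnt : ∀ k ∈ t, p k = q k := by
        intro k hk
        exact hagree k (fun h => (List.nodup_cons.1 hl).1 (h ▸ hk))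
      simp only [List.filter_cons, hpw, hqw]
      simp only [List.filter_congr hnt]
      exact List.Perm.refl _
    · have haw : a ≠ w := by
        rintro rfl; exact (List.nodup_cons.1 hl).1 hwt
      have := ih (List.nodup_cons.1 hl).2 hwt
      simp only [List.filter_cons, hagree a haw]
      by_cases hq : q a = true
      · simp only [hq, if_true]
        exact (this.cons a).trans (List.Perm.swap _ _ _)
      · simp only [eq_false_of_ne_true hq]
        exact this

theorem pv_mark_U (d : PySem.Dict Int (List Int)) (pred : PySem.Dict Int Int) (w v : Int)
    (hnd : d.keys.Nodup) (hw : w ∈ d.keys) (hunm : pred.getD w 0 = 0) (hv : v ≠ 0) :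
    pvU d (pred.insert w v) + 1 = pvU d pred ∧
    pvPhi d (pred.insert w v) + ((d.getD w []).length + 2) = pvPhi d pred := by
  have hperm : List.Perm (d.keys.filter (fun k => pred.getD k 0 = 0))
      (w :: d.keys.filter (fun k => (pred.insert w v).getD k 0 = 0)) := by
    apply pv_filter_perm_mark _ _ _ hnd hw
    · simpa using hunm
    · simp [hv]
    · intro k hk
      simp [PySem.Dict.getD_insert, hk]
  constructor
  · unfold pvU
    have h := hperm.length_eq
    rw [List.length_cons] at h
    omega
  · unfold pvPhi
    have h := (hperm.map (fun k => (d.getD k []).length + 2)).sum_eq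
    rw [List.map_cons, List.sum_cons] at h
    omega

theorem pv_U_le (d : PySem.Dict Int (List Int)) (pred : PySem.Dict Int Int) :
    pvU d pred ≤ d.keys.length := by
  exact List.length_filter_le _ _

theorem pv_Phi_le (d : PySem.Dict Int (List Int)) (pred : PySem.Dict Int Int) :
    pvPhi d pred ≤ (d.keys.map (fun k => (d.getD k []).length)).sum + 2 * d.keys.length := by
  have h1 : pvPhi d pred ≤ ((d.keys.map (fun k => (d.getD k []).length + 2))).sum := by
    exact List.Sublist.sum_le_sum (List.Sublist.map _ List.filter_sublist) (by intro x hx; positivity)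
  have h2 : ∀ l : List Int, ((l.map (fun k => (d.getD k []).length + 2))).sum =
      (l.map (fun k => (d.getD k []).length)).sum + 2 * l.length := by
    intro l; induction l with
    | nil => simp
    | cons a t ih => simp [ih]; ring
  calc pvPhi d pred ≤ _ := h1
    _ = _ := h2 d.keys

theorem pv_loopB_mono (d : PySem.Dict Int (List Int)) :
    ∀ (f : Nat) (st : List (Int × List Int × Int)) (pred prof : PySem.Dict Int Int) r,
      pvLoopB d f st pred prof = some r → ∀ f', f ≤ f' → pvLoopB d f' st pred prof = some r := by
  have step : ∀ (f : Nat) (st : List (Int × List Int × Int)) (pred prof : PySem.Dict Int Int) r,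
      pvLoopB d f st pred prof = some r → pvLoopB d (f + 1) st pred prof = some r := by
    intro f
    induction f with
    | zero =>
      intro st pred prof r h
      match st with
      | [] => simpa [pvLoopB] using h
      | _ :: _ => simp [pvLoopB] at h
    | succ f ih =>
      intro st pred prof r h
      match st with
      | [] => simpa [pvLoopB] using h
      | (v, ns, depth) :: st' =>
        match ns with
        | [] =>
          rw [pvLoopB] at h ⊢
          exact ih _ _ _ _ h
        | voisin :: rest =>
          rw [pvLoopB] at h ⊢
          by_cases hc : pred.getD voisin 0 = 0
          · rw [if_pos hc] at h ⊢; exact ih _ _ _ _ h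
          · rw [if_neg hc] at h ⊢; exact ih _ _ _ _ h
  intro f st pred prof r h f' hle
  induction f' with
  | zero =>
    have hf : f = 0 := by omega
    subst hf; exact h
  | succ g ih =>
    rcases Nat.lt_or_ge f (g + 1) with hlt | hge
    · exact step g _ _ _ _ (ih (by omega))
    · have hf : f = g + 1 := by omega
      subst hf; exact h

-- a Dict insert that rewrites an existing binding with its current value is the identity
theorem pv_insert_same (pred : PySem.Dict Int Int) (k v : Int) (hnd : pred.keys.Nodup)
    (h : pred.get? k = some v) : pred.insert k v = pred := by
  apply PySem.Dict.ext
  have hct : pred.contains k = true := by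
    rw [PySem.Dict.contains_eq_isSome_get?, h]; rfl
  rw [PySem.Dict.items_insert, hct]
  simp only [if_true]
  conv_rhs => rw [← List.map_id pred.items]
  apply List.map_congr_left
  rintro ⟨a, b⟩ hp
  have h2 : pred.get? a = some b := PySem.Dict.get?_of_mem_items pred hp hnd
  by_cases hak : a = k
  · subst hak
    have hbv : b = v := by
      rw [h2] at h
      exact Option.some.inj h
    subst hbv
    simp
  · simp [hak]

-- budget paid out when vertex 0 gets marked: one extra scan of 0's neighbourhood
def pvB0 (d : PySem.Dict Int (List Int)) : Nat :=
  ((d.getD 0 []).map (fun w => (d.getD w []).length + 2)).sum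

-- potential: marked-vertex potential plus the 0-flag budget
def pvPhi2 (d : PySem.Dict Int (List Int)) (pred : PySem.Dict Int Int) : Nat :=
  pvPhi d pred + (if (0 : Int) ∈ d.keys ∧ pred.getD 0 0 = 0 then pvB0 d else 0)

-- extra allowance for a neighbour loop running at vertex 0 (whose pushes mark nothing)
def pvEps (d : PySem.Dict Int (List Int)) (sommet : Int) (ns : List Int) : Nat :=
  if sommet = 0 then (ns.map (fun w => (d.getD w []).length + 2)).sum else 0

theorem pv_eps_cons (d : PySem.Dict Int (List Int)) (sommet w : Int) (rest : List Int) :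
    pvEps d sommet (w :: rest) =
      (if sommet = 0 then (d.getD w []).length + 2 else 0) + pvEps d sommet rest := by
  unfold pvEps
  by_cases h : sommet = 0 <;> simp [h]

-- the central simulation lemma: A's neighbour loop = a segment of B's stack loop
theorem pv_main (d : PySem.Dict Int (List Int)) (hnd : d.keys.Nodup)
    (h00 : (0 : Int) ∉ d.getD 0 [])
    (hcl : ∀ k ∈ d.keys, ∀ v ∈ d.getD k [], v ∈ d.keys) :
    ∀ u : Nat, ∀ (ns : List Int) (pred prof : PySem.Dict Int Int) (sommet depth : Int),
      pred.keys = d.keys →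
      2 * pvU d pred + (if sommet = 0 then 1 else 0) ≤ u →
      (∀ x ∈ ns, x ∈ d.keys) → (sommet = 0 → ∀ x ∈ ns, x ≠ 0) →
      ∀ f : Nat, u < f →
      ∃ p q, pvGoA d f sommet depth ns pred prof = some (p, q) ∧
        pvU d p ≤ pvU d pred ∧ p.keys = d.keys ∧
        ∃ c, c + pvPhi2 d p ≤ ns.length + 1 + pvPhi2 d pred + pvEps d sommet ns ∧
          ∀ (st : List (Int × List Int × Int)) (fB : Nat),
            pvLoopB d (fB + c) ((sommet, ns, depth) :: st) pred prof = pvLoopB d fB st p q := by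
  intro u
  induction u using Nat.strong_induction_on with
  | _ u IH =>
  intro ns
  induction ns with
  | nil =>
    intro pred prof sommet depth hpk hU hns hns0 f hf
    refine ⟨pred, prof, by rw [pvGoA], le_rfl, hpk, 1, by simp, ?_⟩
    intro st fB
    rw [pvLoopB]
  | cons w rest ih =>
    intro pred prof sommet depth hpk hU hns hns0 f hf
    have hw : w ∈ d.keys := hns w (by simp)
    have hwc : pred.contains w = true := by
      rw [PySem.Dict.contains_iff_mem_keys, hpk]; exact hw
    have hrest : ∀ x ∈ rest, x ∈ d.keys := fun x hx => hns x (by simp [hx])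
    have hrest0 : sommet = 0 → ∀ x ∈ rest, x ≠ 0 :=
      fun hz x hx => hns0 hz x (by simp [hx])
    have hndp : pred.keys.Nodup := by rw [hpk]; exact hnd
    have hlen : (w :: rest).length = rest.length + 1 := rfl
    have heps := pv_eps_cons d sommet w rest
    by_cases hc : pred.getD w 0 = 0
    · -- w is unmarked: A recurses, B pushes a frame
      obtain ⟨f', rfl⟩ : ∃ f', f = f' + 1 := ⟨f - 1, by omega⟩
      by_cases hz : sommet = 0
      · -- pushing from vertex 0 marks nothing: pred is unchanged
        subst hz
        have hU' : 2 * pvU d pred + 1 ≤ u := by simpa using hU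
        have hw0 : w ≠ 0 := hns0 rfl w (by simp)
        have hget : pred.get? w = some 0 := by
          have : (pred.get? w).isSome := by
            rw [← PySem.Dict.contains_eq_isSome_get?, hwc]
          obtain ⟨v, hv⟩ := Option.isSome_iff_exists.mp this
          rw [hv]
          have := PySem.Dict.getD_of_get?_eq_some pred (0 : Int) hv
          rw [hc] at this
          rw [this]
        have hid : pred.insert w 0 = pred := pv_insert_same pred w 0 hndp hget
        obtain ⟨p1, q1, hA1, hU1, hpk1, c1, hc1, hcorr1⟩ :=
          IH (u - 1) (by omega) (d.getD w []) pred (prof.insert w (depth + 1))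
            w (depth + 1) hpk (by simp [hw0]; omega) (hcl w hw)
            (fun h => absurd h hw0) f' (by omega)
        obtain ⟨p, q, hA2, hU2, hpk2, c2, hc2, hcorr2⟩ :=
          ih p1 q1 0 depth hpk1 (by simp; omega) hrest hrest0 (f' + 1) hf
        have hepsw : pvEps d w (d.getD w []) = 0 := by simp [pvEps, hw0]
        refine ⟨p, q, ?_, by omega, hpk2, c1 + c2 + 1, by simp at heps; omega, ?_⟩
        · rw [pvGoA, if_pos hc, pvRecA]
          rw [hid, hA1]
          exact hA2
        · intro st fB
          have e1 : fB + (c1 + c2 + 1) = ((fB + c2) + c1) + 1 := by omega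
          rw [e1, pvLoopB, if_pos hc, hid, hcorr1 ((0, rest, depth) :: st) (fB + c2),
            hcorr2 st fB]
      · -- a genuine marking: the number of unmarked vertices drops
        have hU' : 2 * pvU d pred ≤ u := by simpa [hz] using hU
        obtain ⟨hUeq, hPhieq⟩ := pv_mark_U d pred w sommet hnd hw hc hz
        have hpk1 : (pred.insert w sommet).keys = d.keys := by
          rw [PySem.Dict.keys_insert_of_contains pred _ hwc]; exact hpk
        -- how the 0-flag of the potential moves under this insert
        have hflag : (if (0 : Int) ∈ d.keys ∧ (pred.insert w sommet).getD 0 0 = 0 then pvB0 d else 0)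
            + (if w = 0 then pvB0 d else 0)
            = (if (0 : Int) ∈ d.keys ∧ pred.getD 0 0 = 0 then pvB0 d else 0) := by
          by_cases hw0 : w = 0
          · subst hw0
            simp [hz, hc, hw]
          · rw [PySem.Dict.getD_insert]
            simp [hw0, if_neg (Ne.symm hw0)]
        have hepsw : pvEps d w (d.getD w []) = if w = 0 then pvB0 d else 0 := by
          by_cases hw0 : w = 0 <;> simp [pvEps, pvB0, hw0]
        obtain ⟨p1, q1, hA1, hU1, hpk1', c1, hc1, hcorr1⟩ :=
          IH (u - 1) (by omega) (d.getD w []) (pred.insert w sommet) (prof.insert w (depth + 1))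
            w (depth + 1) hpk1
            (by have hb : (if w = 0 then 1 else 0) ≤ 1 := by split_ifs <;> omega
                omega) (hcl w hw)
            (by rintro rfl x hx h; exact h00 (h ▸ hx)) f' (by omega)
        obtain ⟨p, q, hA2, hU2, hpk2, c2, hc2, hcorr2⟩ :=
          ih p1 q1 sommet depth hpk1' (by simp [hz]; omega) hrest hrest0 (f' + 1) hf
        refine ⟨p, q, ?_, by omega, hpk2, c1 + c2 + 1, ?_, ?_⟩
        · rw [pvGoA, if_pos hc, pvRecA]
          rw [hA1]
          exact hA2
        · rw [hepsw] at hc1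
          unfold pvPhi2 at hc1 hc2 ⊢
          simp only [hz, if_false] at heps
          omega
        · intro st fB
          have e1 : fB + (c1 + c2 + 1) = ((fB + c2) + c1) + 1 := by omega
          rw [e1, pvLoopB, if_pos hc, hcorr1 ((sommet, rest, depth) :: st) (fB + c2),
            hcorr2 st fB]
    · -- w is already marked: both sides skip it
      obtain ⟨p, q, hA2, hU2, hpk2, c2, hc2, hcorr2⟩ :=
        ih pred prof sommet depth hpk hU hrest hrest0 f hf
      refine ⟨p, q, ?_, hU2, hpk2, c2 + 1, by omega, ?_⟩
      · rw [pvGoA, if_neg hc]; exact hA2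
      · intro st fB
        have e1 : fB + (c2 + 1) = (fB + c2) + 1 := by omega
        rw [e1, pvLoopB, if_neg hc]
        exact hcorr2 st fB

-- crude computable bounds on the potential pieces
theorem pv_B0_le (d : PySem.Dict Int (List Int))
    (hcl : ∀ k ∈ d.keys, ∀ v ∈ d.getD k [], v ∈ d.keys) :
    pvB0 d ≤ (d.keys.map (fun k => (d.getD k []).length)).sum *
      ((d.keys.map (fun k => (d.getD k []).length)).sum + 2) := by
  set S := (d.keys.map (fun k => (d.getD k []).length)).sum with hS
  by_cases h0 : (0 : Int) ∈ d.keys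
  · have hlen0 : (d.getD 0 []).length ≤ S :=
      List.single_le_sum (fun x _ => Nat.zero_le x) _ (List.mem_map_of_mem h0)
    have hbound : ∀ x ∈ (d.getD 0 []).map (fun w => (d.getD w []).length + 2), x ≤ S + 2 := by
      intro x hx
      obtain ⟨w, hw, rfl⟩ := List.mem_map.mp hx
      have hwk := hcl 0 h0 w hw
      have : (d.getD w []).length ≤ S :=
        List.single_le_sum (fun x _ => Nat.zero_le x) _ (List.mem_map_of_mem hwk)
      omega
    calc pvB0 d ≤ ((d.getD 0 []).map (fun w => (d.getD w []).length + 2)).length * (S + 2) :=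
          List.sum_le_card_nsmul _ _ hbound
      _ = (d.getD 0 []).length * (S + 2) := by rw [List.length_map]
      _ ≤ S * (S + 2) := Nat.mul_le_mul_right _ hlen0
  · have : d.getD 0 [] = [] := by
      apply PySem.Dict.getD_of_not_contains
      rw [PySem.Dict.contains_eq_decide_mem_keys]
      simp [h0]
    unfold pvB0
    rw [this]
    simp
theorem pv_Phi2_le (d : PySem.Dict Int (List Int))
    (hcl : ∀ k ∈ d.keys, ∀ v ∈ d.getD k [], v ∈ d.keys) (pred : PySem.Dict Int Int) :
    pvPhi2 d pred ≤ (d.keys.map (fun k => (d.getD k []).length)).sum + 2 * d.keys.length +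
      (d.keys.map (fun k => (d.getD k []).length)).sum *
        ((d.keys.map (fun k => (d.getD k []).length)).sum + 2) := by
  have h1 := pv_Phi_le d pred
  have h2 := pv_B0_le d hcl
  unfold pvPhi2
  split_ifs <;> omega

-- the root loops agree
theorem pv_roots (d : PySem.Dict Int (List Int)) (hnd : d.keys.Nodup)
    (h00 : (0 : Int) ∉ d.getD 0 [])
    (hcl : ∀ k ∈ d.keys, ∀ v ∈ d.getD k [], v ∈ d.keys)
    (n S : Nat) (hn : n = d.keys.length) (hS : S = (d.keys.map (fun k => (d.getD k []).length)).sum) :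
    ∀ (rs : List Int), (∀ s ∈ rs, s ∈ d.keys) → ∀ (pred prof : PySem.Dict Int Int),
      pred.keys = d.keys →
      rs.foldl (fun (st : Option (PySem.Dict Int Int × PySem.Dict Int Int)) s =>
        match st with
        | none => none
        | some (pred, prof) =>
          if pred.getD s 0 = 0 then pvRecA d (2 * n + 3) s 0 (pred.insert s s) prof
          else some (pred, prof)) (some (pred, prof)) =
      rs.foldl (fun (st : Option (PySem.Dict Int Int × PySem.Dict Int Int)) s =>
        match st with
        | none => none
        | some (pred, prof) =>
          if pred.getD s 0 = 0 then
            pvLoopB d (2 * (S * (S + 2)) + 2 * S + 2 * n + 2) [(s, d.getD s [], 0)]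
              (pred.insert s s) (prof.insert s 0)
          else some (pred, prof)) (some (pred, prof)) := by
  intro rs
  induction rs with
  | nil => intro _ pred prof _; rfl
  | cons s rs' ih =>
    intro hrs pred prof hpk
    have hsk : s ∈ d.keys := hrs s (by simp)
    have hsc : pred.contains s = true := by
      rw [PySem.Dict.contains_iff_mem_keys, hpk]; exact hsk
    have hrs' : ∀ x ∈ rs', x ∈ d.keys := fun x hx => hrs x (by simp [hx])
    have hndp : pred.keys.Nodup := by rw [hpk]; exact hnd
    simp only [List.foldl_cons]
    by_cases hc : pred.getD s 0 = 0
    · have hUle := pv_U_le d pred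
      have hpk1 : (pred.insert s s).keys = d.keys := by
        rw [PySem.Dict.keys_insert_of_contains pred _ hsc]; exact hpk
      have hmark : 2 * pvU d (pred.insert s s) + (if s = 0 then 1 else 0) ≤ 2 * n + 1 := by
        by_cases hz : s = 0
        · subst hz
          have hget : pred.get? 0 = some 0 := by
            have : (pred.get? 0).isSome := by
              rw [← PySem.Dict.contains_eq_isSome_get?, hsc]
            obtain ⟨v, hv⟩ := Option.isSome_iff_exists.mp this
            rw [hv]
            have := PySem.Dict.getD_of_get?_eq_some pred (0 : Int) hv
            rw [hc] at this
            rw [this]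
          rw [pv_insert_same pred 0 0 hndp hget]
          simp
          omega
        · obtain ⟨hUeq, _⟩ := pv_mark_U d pred s s hnd hsk hc hz
          simp [hz]
          omega
      obtain ⟨p, q, hA, hUp, hpkp, c, hcb, hcorr⟩ :=
        pv_main d hnd h00 hcl (2 * n + 1) (d.getD s []) (pred.insert s s)
          (prof.insert s 0) s 0 hpk1 hmark (hcl s hsk)
          (by rintro rfl x hx h; exact h00 (h ▸ hx)) (2 * n + 2) (by omega)
      have hPhile := pv_Phi2_le d hcl (pred.insert s s)
      have hadj : (d.getD s []).length ≤ S := hS ▸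
        List.single_le_sum (fun x _ => Nat.zero_le x) _ (List.mem_map_of_mem hsk)
      have hepsle : pvEps d s (d.getD s []) ≤ S * (S + 2) := by
        by_cases hz : s = 0
        · subst hz
          have := pv_B0_le d hcl
          simpa [pvEps, pvB0, ← hS] using this
        · simp [pvEps, hz]
      have hcle : c ≤ 2 * (S * (S + 2)) + 2 * S + 2 * n + 2 := by
        rw [← hS, ← hn] at hPhile
        omega
      have hBc : pvLoopB d c [(s, d.getD s [], 0)] (pred.insert s s) (prof.insert s 0) = some (p, q) := by
        have := hcorr [] 0
        simpa [pvLoopB] using this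
      have hB := pv_loopB_mono d c [(s, d.getD s [], 0)] (pred.insert s s) (prof.insert s 0)
        (p, q) hBc (2 * (S * (S + 2)) + 2 * S + 2 * n + 2) hcle
      have hAstep : pvRecA d (2 * n + 3) s 0 (pred.insert s s) prof = some (p, q) := by
        rw [pvRecA]; exact hA
      rw [if_pos hc, hAstep, if_pos hc, hB]
      exact ih hrs' p q hpkp
    · rw [if_neg hc, if_neg hc]
      exact ih hrs' pred prof hpk

theorem pv_init_pair (ks : List Int) (a b : PySem.Dict Int Int) :
    ks.foldl (fun (pq : PySem.Dict Int Int × PySem.Dict Int Int) s =>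
      (pq.1.insert s 0, pq.2.insert s 0)) (a, b) =
    (ks.foldl (fun (x : PySem.Dict Int Int) s => x.insert s 0) a,
     ks.foldl (fun (x : PySem.Dict Int Int) s => x.insert s 0) b) := by
  induction ks generalizing a b with
  | nil => rfl
  | cons s t ih => simpa using ih (a.insert s 0) (b.insert s 0)

theorem pv_init_keys (ks : List Int) (a : PySem.Dict Int Int) :
    (ks.foldl (fun (x : PySem.Dict Int Int) s => x.insert s 0) a).keys = PySem.Set.update a.keys ks := by
  exact PySem.Dict.keys_foldl_insert ks _ a

-- ===== VERDICT (by name: the statement is the Claim_ definition above) =====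
theorem parcours_profondeur_spec : Claim_equal_parcours_profondeur := by
  intro G _hdom hpre
  obtain ⟨h00, hcl⟩ := hpre
  have hnd := PySem.Dict.nodup_keys_ofList (ps := G)
  have hpk0 : ((PySem.Dict.ofList G).keys.foldl
      (fun (x : PySem.Dict Int Int) s => x.insert s 0) PySem.Dict.empty).keys =
      (PySem.Dict.ofList G).keys := by
    rw [pv_init_keys]
    have he : (PySem.Dict.empty : PySem.Dict Int Int).keys = ([] : List Int) := rfl
    rw [he, PySem.Set.update_nil_left]
    exact PySem.Set.ofList_eq_self_of_nodup _ hnd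
  unfold Spec_parcours_profondeur parcours_profondeur parcours_profondeur_alt
  simp only [pv_init_pair]
  rw [pv_roots (PySem.Dict.ofList G) hnd h00 hcl
    (PySem.Dict.ofList G).keys.length
    ((PySem.Dict.ofList G).keys.map (fun k => ((PySem.Dict.ofList G).getD k []).length)).sum
    rfl rfl (PySem.Dict.ofList G).keys (fun _ hs => hs) _ _ hpk0]
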